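-- pv_equiv track=rewrite | github.com/Rayhaneh-Einollahi/SAYAC_Compiler | assembler/assembler.py | expand_label_macros
-- ===== SOURCE A (Python) =====
-- def compute_prefix(instruction, lines):
--     prefix_sum = [0] * (len(lines) + 1)
--     count = 0
--     i = 0
--     for line in lines:
--         if line.strip().endswith(':'):
--             continue
--         parts = line.split()
--         if parts and parts[0].upper() == instruction:
--             count += 1
--         prefix_sum[i] = count
--         i += 1
--     return prefix_sum
--
-- def cal_approx_offset(pc, target, labels, jmp_prefix, brr_prefix, sra_prefix):
--     return labels[target] - pc \
--             + (jmp_prefix[labels[target] - 1] - jmp_prefix[pc]) * 2 \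
--             + (brr_prefix[labels[target] - 1] - brr_prefix[pc]) * 2 \
--             + (sra_prefix[labels[target] - 1] - sra_prefix[pc])
--
-- def expand_label_macros(lines, labels):
--     jmp_prefix = compute_prefix('JMP', lines)
--     brr_prefix = compute_prefix('BRR', lines)
--     sra_prefix = compute_prefix('SRA', lines)
--     pc = 0
--     new_lines = []
--     for i, line in enumerate(lines):
--         line = line.strip()
--         parts = line.split()
--         if line.endswith(':'):
--             new_lines.append(line)
--             continue
--         op = parts[0].upper()
--
--         if op == 'SRA':
--             target = parts[1]
--             reg = parts[2]
--             approx_offset = cal_approx_offset(pc, target, labels, jmp_prefix, brr_prefix, sra_prefix)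
--             if -128 <= approx_offset <= 127:
--                 new_lines.append(line)
--             else:
--                 new_lines.extend([
--                     f'PLACE_HOLDER',
--                     line
--                 ])
--
--         elif op == 'JMP':
--             target = parts[1]
--             retReg = parts[2]
--             approx_offset = cal_approx_offset(pc, target, labels, jmp_prefix, brr_prefix, sra_prefix)
--             if -32 <= approx_offset <= 31:
--                 new_lines.append(f'JMI {target} {retReg}')
--             elif -128 <= approx_offset <= 127:
--                 new_lines.extend([
--                     f'PLACE_HOLDER',
--                     f'JMR {target} {retReg}'
--                 ])
--             else:
--                 new_lines.extend([
--                     f'PLACE_HOLDER',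
--                     f'PLACE_HOLDER',
--                     f'JMR {target} {retReg}'
--                 ])
--
--         elif op == 'BRR' and parts[2] in labels:
--             target = parts[2]
--             approx_offset = cal_approx_offset(pc, target, labels, jmp_prefix, brr_prefix, sra_prefix)
--             flag = parts[1]
--             if -128 <= approx_offset <= 127:
--                 new_lines.extend([
--                     f'PLACE_HOLDER',
--                     f'BRR {flag} {target}'
--                 ])
--             else:
--                 new_lines.extend([
--                     f'PLACE_HOLDER',
--                     f'PLACE_HOLDER',
--                     f'BRR {flag} {target}'
--                 ])
--         else:
--             new_lines.append(line)
--         pc += 1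
--     return new_lines
-- ===== SOURCE B (Python) =====
-- def expand_label_macros(lines, labels):
--     # Single pass collects the uppercase opcode of every non-label line; each
--     # approximate offset is then a weighted scan of the opcode span between
--     # pc and the label's position (JMP/BRR weigh 2 extra, SRA 1 extra).
--     ops = []
--     for raw in lines:
--         s = raw.strip()
--         if not s.endswith(':'):
--             toks = raw.split()
--             ops.append(toks[0].upper() if toks else '')
--
--     def extra_weight(op):
--         return 2 if op in ('JMP', 'BRR') else (1 if op == 'SRA' else 0)
--
--     def approx_offset(pc, target):
--         v = labels[target]
--         if v > pc:
--             span = ops[pc + 1:v]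
--             return v - pc + sum(extra_weight(o) for o in span)
--         else:
--             span = ops[v:pc + 1]
--             return v - pc - sum(extra_weight(o) for o in span)
--
--     new_lines = []
--     pc = 0
--     for raw in lines:
--         line = raw.strip()
--         if line.endswith(':'):
--             new_lines.append(line)
--             continue
--         parts = line.split()
--         op = parts[0].upper()
--
--         if op == 'SRA':
--             off = approx_offset(pc, parts[1])
--             if -128 <= off <= 127:
--                 new_lines.append(line)
--             else:
--                 new_lines.extend(['PLACE_HOLDER', line])
--         elif op == 'JMP':
--             target, retReg = parts[1], parts[2]
--             off = approx_offset(pc, target)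
--             if -32 <= off <= 31:
--                 new_lines.append(f'JMI {target} {retReg}')
--             elif -128 <= off <= 127:
--                 new_lines.extend(['PLACE_HOLDER', f'JMR {target} {retReg}'])
--             else:
--                 new_lines.extend(['PLACE_HOLDER', 'PLACE_HOLDER', f'JMR {target} {retReg}'])
--         elif op == 'BRR' and parts[2] in labels:
--             target, flag = parts[2], parts[1]
--             off = approx_offset(pc, target)
--             if -128 <= off <= 127:
--                 new_lines.extend(['PLACE_HOLDER', f'BRR {flag} {target}'])
--             else:
--                 new_lines.extend(['PLACE_HOLDER', 'PLACE_HOLDER', f'BRR {flag} {target}'])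
--         else:
--             new_lines.append(line)
--         pc += 1
--     return new_lines
-- ===== Notes on version B (the rewrite author's own statement) =====
-- stated objective: simpler
-- what changed: Replaces the three per-instruction prefix-sum table passes (and their negative-index/unfilled-tail reads) by a single opcode-list pass, computing each approximate offset directly as a weighted sum over the opcode slice between pc and the label position; on typical inputs this avoids building three length-(n+1) tables.
import Mathlib
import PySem

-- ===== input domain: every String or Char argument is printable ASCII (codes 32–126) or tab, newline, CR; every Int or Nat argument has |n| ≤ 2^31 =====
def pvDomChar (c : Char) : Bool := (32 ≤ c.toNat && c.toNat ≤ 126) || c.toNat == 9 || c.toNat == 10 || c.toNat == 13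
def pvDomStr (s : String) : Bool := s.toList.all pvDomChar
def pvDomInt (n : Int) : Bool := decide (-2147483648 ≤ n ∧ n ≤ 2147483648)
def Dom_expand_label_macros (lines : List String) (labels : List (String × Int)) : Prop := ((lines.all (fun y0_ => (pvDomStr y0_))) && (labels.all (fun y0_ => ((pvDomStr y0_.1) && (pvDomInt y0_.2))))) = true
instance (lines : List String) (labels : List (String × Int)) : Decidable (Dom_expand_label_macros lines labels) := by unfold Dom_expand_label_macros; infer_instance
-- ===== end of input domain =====

-- B replaces A's three prefix-sum tables by a single opcode list and a weighted
-- slice sum per offset (objective: simpler); return values agree on Pre_.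

-- shared helper: the f-string 'OP {x} {y}'
def pvFmt3 (w t r : String) : String := PySem.Str.join " " [w, t, r]

-- ===== PORT A =====
def compute_prefix_go (instruction : String) (rest : List String) (prefixSum : List Int) (count : Int) (i : Nat) : List Int :=
  match rest with
  | [] => prefixSum
  | line :: t =>
    if PySem.Str.endswith (PySem.Str.strip line) ":" then
      compute_prefix_go instruction t prefixSum count i
    else
      let parts := PySem.Str.split₀ line
      let count' := if parts ≠ [] ∧ PySem.Str.upper (parts.headD "") = instruction then count + 1 else count
      compute_prefix_go instruction t (prefixSum.set i count') count' (i + 1)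

def compute_prefix (instruction : String) (lines : List String) : List Int :=
  compute_prefix_go instruction lines (List.replicate (lines.length + 1) 0) 0 0

def cal_approx_offset (pc : Int) (target : String) (labels : List (String × Int)) (jmpPrefix brrPrefix sraPrefix : List Int) : Int :=
  let v := (labels.lookup target).getD 0      -- labels[target]; KeyError excluded by Pre_
  v - pc + (PySem.List.pyGetD jmpPrefix (v - 1) 0 - PySem.List.pyGetD jmpPrefix pc 0) * 2
         + (PySem.List.pyGetD brrPrefix (v - 1) 0 - PySem.List.pyGetD brrPrefix pc 0) * 2
         + (PySem.List.pyGetD sraPrefix (v - 1) 0 - PySem.List.pyGetD sraPrefix pc 0)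

def expand_go (labels : List (String × Int)) (jp bp sp : List Int) : List String → Int → List String → List String
  | [], _, acc => acc
  | raw :: t, pc, acc =>
    let line := PySem.Str.strip raw
    let parts := PySem.Str.split₀ line
    if PySem.Str.endswith line ":" then
      expand_go labels jp bp sp t pc (acc ++ [line])
    else
      let op := PySem.Str.upper (parts.headD "")     -- parts[0]; empty parts excluded by Pre_
      if op = "SRA" then
        let target := parts.getD 1 ""
        let off := cal_approx_offset pc target labels jp bp sp
        if -128 ≤ off ∧ off ≤ 127 then expand_go labels jp bp sp t (pc + 1) (acc ++ [line])
        else expand_go labels jp bp sp t (pc + 1) (acc ++ ["PLACE_HOLDER", line])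
      else if op = "JMP" then
        let target := parts.getD 1 ""
        let retReg := parts.getD 2 ""
        let off := cal_approx_offset pc target labels jp bp sp
        if -32 ≤ off ∧ off ≤ 31 then expand_go labels jp bp sp t (pc + 1) (acc ++ [pvFmt3 "JMI" target retReg])
        else if -128 ≤ off ∧ off ≤ 127 then expand_go labels jp bp sp t (pc + 1) (acc ++ ["PLACE_HOLDER", pvFmt3 "JMR" target retReg])
        else expand_go labels jp bp sp t (pc + 1) (acc ++ ["PLACE_HOLDER", "PLACE_HOLDER", pvFmt3 "JMR" target retReg])
      else if op = "BRR" ∧ (labels.lookup (parts.getD 2 "")).isSome = true then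
        let target := parts.getD 2 ""
        let flag := parts.getD 1 ""
        let off := cal_approx_offset pc target labels jp bp sp
        if -128 ≤ off ∧ off ≤ 127 then expand_go labels jp bp sp t (pc + 1) (acc ++ ["PLACE_HOLDER", pvFmt3 "BRR" flag target])
        else expand_go labels jp bp sp t (pc + 1) (acc ++ ["PLACE_HOLDER", "PLACE_HOLDER", pvFmt3 "BRR" flag target])
      else
        expand_go labels jp bp sp t (pc + 1) (acc ++ [line])

def expand_label_macros (lines : List String) (labels : List (String × Int)) : List String :=
  let jp := compute_prefix "JMP" lines
  let bp := compute_prefix "BRR" lines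
  let sp := compute_prefix "SRA" lines
  expand_go labels jp bp sp lines 0 []

-- ===== PORT B =====
def opsOf : List String → List String
  | [] => []
  | raw :: t =>
    let s := PySem.Str.strip raw
    if PySem.Str.endswith s ":" then opsOf t
    else
      let toks := PySem.Str.split₀ raw
      (if toks ≠ [] then PySem.Str.upper (toks.headD "") else "") :: opsOf t

def extra_weight (op : String) : Int :=
  if op = "JMP" ∨ op = "BRR" then 2 else if op = "SRA" then 1 else 0

def approx_offset (labels : List (String × Int)) (ops : List String) (pc : Int) (target : String) : Int :=
  let v := (labels.lookup target).getD 0      -- labels[target]; KeyError excluded by Pre_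
  if v > pc then v - pc + ((PySem.List.slice ops (some (pc + 1)) (some v)).map extra_weight).sum
  else v - pc - ((PySem.List.slice ops (some v) (some (pc + 1))).map extra_weight).sum

def rewrite_line (labels : List (String × Int)) (ops : List String) (line : String) (pc : Int) : List String :=
  let parts := PySem.Str.split₀ line
  let op := PySem.Str.upper (parts.headD "")
  if op = "SRA" then
    let off := approx_offset labels ops pc (parts.getD 1 "")
    if -128 ≤ off ∧ off ≤ 127 then [line] else ["PLACE_HOLDER", line]
  else if op = "JMP" then
    let target := parts.getD 1 ""
    let retReg := parts.getD 2 ""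
    let off := approx_offset labels ops pc target
    if -32 ≤ off ∧ off ≤ 31 then [pvFmt3 "JMI" target retReg]
    else if -128 ≤ off ∧ off ≤ 127 then ["PLACE_HOLDER", pvFmt3 "JMR" target retReg]
    else ["PLACE_HOLDER", "PLACE_HOLDER", pvFmt3 "JMR" target retReg]
  else if op = "BRR" ∧ (labels.lookup (parts.getD 2 "")).isSome = true then
    let target := parts.getD 2 ""
    let flag := parts.getD 1 ""
    let off := approx_offset labels ops pc target
    if -128 ≤ off ∧ off ≤ 127 then ["PLACE_HOLDER", pvFmt3 "BRR" flag target]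
    else ["PLACE_HOLDER", "PLACE_HOLDER", pvFmt3 "BRR" flag target]
  else [line]

def expand_alt_go (labels : List (String × Int)) (ops : List String) : List String → Int → List String
  | [], _ => []
  | raw :: t, pc =>
    let s := PySem.Str.strip raw
    if PySem.Str.endswith s ":" then s :: expand_alt_go labels ops t pc
    else rewrite_line labels ops s pc ++ expand_alt_go labels ops t (pc + 1)

def expand_label_macros_alt (lines : List String) (labels : List (String × Int)) : List String :=
  expand_alt_go labels (opsOf lines) lines 0

-- ===== PRECONDITION & SPEC =====
def pvNoncount (lines : List String) : Nat :=
  (lines.filter (fun l => !(PySem.Str.endswith (PySem.Str.strip l) ":"))).length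

def labelOKb (labels : List (String × Int)) (N : Nat) (t : String) : Bool :=
  match labels.lookup t with
  | some v => decide (0 ≤ v ∧ v ≤ (N : Int))
  | none => false

def LinePreB (labels : List (String × Int)) (N : Nat) (raw : String) : Bool :=
  let s := PySem.Str.strip raw
  if PySem.Str.endswith s ":" then true
  else
    let parts := PySem.Str.split₀ s
    let op := PySem.Str.upper (parts.headD "")
    decide (parts ≠ []) &&
      (if op = "SRA" ∨ op = "JMP" then decide (3 ≤ parts.length) && labelOKb labels N (parts.getD 1 "")
       else if op = "BRR" then
         decide (3 ≤ parts.length) &&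
           (!(labels.lookup (parts.getD 2 "")).isSome || labelOKb labels N (parts.getD 2 ""))
       else true)

-- Pre_ excludes (a) inputs where A raises (blank non-label lines, too few tokens on a
-- jump/branch line, a jump target missing from labels, or a label value sending the
-- prefix index out of range) and (b) inputs where a used label value lies outside
-- 0..#non-label-lines, where A still returns but its value comes from Python
-- negative-index wraparound or the unfilled zero tail of its prefix arrays — an
-- accident of the prefix-table representation.
def Pre_expand_label_macros (lines : List String) (labels : List (String × Int)) : Prop :=
  lines.all (LinePreB labels (pvNoncount lines)) = true
instance (lines : List String) (labels : List (String × Int)) : Decidable (Pre_expand_label_macros lines labels) := by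
  unfold Pre_expand_label_macros; infer_instance

def pvWitness_expand_label_macros : List String × (List (String × Int)) :=
  (["JMP L r0", "loop:", "BRR z L"], [("L", 1)])

def Spec_expand_label_macros (lines : List String) (labels : List (String × Int)) (out : List String) : Prop := out = expand_label_macros_alt lines labels
instance (lines : List String) (labels : List (String × Int)) (out : List String) : Decidable (Spec_expand_label_macros lines labels out) := by unfold Spec_expand_label_macros; infer_instance

-- ===== CLAIM (what is proved, stated in full; the proofs are below) =====
def Claim_equal_expand_label_macros : Prop := ∀ (lines : List String) (labels : List (String × Int)), Dom_expand_label_macros lines labels → Pre_expand_label_macros lines labels → Spec_expand_label_macros lines labels (expand_label_macros lines labels)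

-- ===== LEMMAS AND PROOFS =====

-- count of opcode `instr` in a list, as an Int
def cntI (instr : String) (l : List String) : Int := (l.countP (fun o => o == instr) : Nat)

-- pure form of A's prefix array over the opcode list
def prefAux (instr : String) : List String → Int → List Int
  | [], _ => []
  | o :: t, c => let c' := if o = instr then c + 1 else c; c' :: prefAux instr t c'

theorem length_prefAux (instr : String) (ops : List String) (c : Int) :
    (prefAux instr ops c).length = ops.length := by
  induction ops generalizing c with
  | nil => rfl
  | cons o t ih => simp [prefAux, ih]

theorem opsOf_length (lines : List String) : (opsOf lines).length = pvNoncount lines := by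
  induction lines with
  | nil => rfl
  | cons l t ih =>
    rw [pvNoncount] at ih
    simp only [opsOf]
    rw [pvNoncount, List.filter_cons]
    cases h : PySem.Str.endswith (PySem.Str.strip l) ":" <;> simp [ih]

theorem opsOf_length_le (lines : List String) : (opsOf lines).length ≤ lines.length := by
  induction lines with
  | nil => simp [opsOf]
  | cons l t ih =>
    simp only [opsOf]
    cases h : PySem.Str.endswith (PySem.Str.strip l) ":" <;> simp <;> omega

theorem take_set_succ (ps : List Int) (i : Nat) (c : Int) (h : i < ps.length) :
    (ps.set i c).take (i + 1) = ps.take i ++ [c] := by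
  rw [List.set_eq_take_append_cons_drop, if_pos h, List.take_append]
  simp [List.length_take, Nat.min_eq_left (le_of_lt h)]

theorem compute_prefix_go_eq (instr : String) (hinstr : instr ≠ "") :
    ∀ (lines : List String) (ps : List Int) (c : Int) (i : Nat),
      i + (opsOf lines).length ≤ ps.length →
      compute_prefix_go instr lines ps c i =
        ps.take i ++ prefAux instr (opsOf lines) c ++ ps.drop (i + (opsOf lines).length) := by
  intro lines
  induction lines with
  | nil =>
    intro ps c i h
    simp [compute_prefix_go, opsOf, prefAux]
  | cons raw t ih =>
    intro ps c i h
    simp only [opsOf] at h ⊢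
    simp only [compute_prefix_go]
    cases hl : PySem.Str.endswith (PySem.Str.strip raw) ":"
    · rw [hl] at h
      simp only [Bool.false_eq_true, if_false] at ⊢
      simp only [Bool.false_eq_true, if_false, List.length_cons] at h
      have hcc : (if PySem.Str.split₀ raw ≠ [] ∧
            PySem.Str.upper ((PySem.Str.split₀ raw).headD "") = instr
          then c + 1 else c)
          = (if (if PySem.Str.split₀ raw ≠ [] then
                PySem.Str.upper ((PySem.Str.split₀ raw).headD "") else "") = instr
            then c + 1 else c) := by
        by_cases hp : PySem.Str.split₀ raw = []
        · simp [hp, Ne.symm hinstr]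
        · simp [hp]
      simp only [prefAux, List.length_cons]
      rw [← hcc]
      rw [ih (ps.set i (if PySem.Str.split₀ raw ≠ [] ∧
            PySem.Str.upper ((PySem.Str.split₀ raw).headD "") = instr
          then c + 1 else c)) _ (i + 1) (by simp only [List.length_set]; omega)]
      rw [take_set_succ _ _ _ (by omega)]
      rw [List.drop_set_of_lt (by omega : i < i + 1 + (opsOf t).length)]
      have hidx : i + 1 + (opsOf t).length = i + ((opsOf t).length + 1) := by omega
      rw [hidx]
      simp [List.append_assoc]
    · rw [hl] at h
      exact ih ps c i h

theorem compute_prefix_eq (instr : String) (hinstr : instr ≠ "") (lines : List String) :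
    compute_prefix instr lines =
      prefAux instr (opsOf lines) 0 ++
        List.replicate (lines.length + 1 - (opsOf lines).length) 0 := by
  have hle := opsOf_length_le lines
  rw [compute_prefix, compute_prefix_go_eq instr hinstr lines _ 0 0 (by simp; omega)]
  simp [List.drop_replicate]

theorem prefAux_get (instr : String) :
    ∀ (ops : List String) (c : Int) (j : Nat), j < ops.length →
      (prefAux instr ops c)[j]? = some (c + cntI instr (ops.take (j + 1))) := by
  intro ops
  induction ops with
  | nil => intro c j h; simp at h
  | cons o t ih =>
    intro c j h
    cases j with
    | zero =>
      by_cases ho : o = instr <;>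
        simp [prefAux, cntI, ho]
    | succ j =>
      simp only [prefAux, List.getElem?_cons_succ]
      rw [ih _ j (by simpa using Nat.lt_of_succ_lt_succ h)]
      by_cases ho : o = instr
      · simp [cntI, List.take_succ_cons, ho]; ring
      · simp [cntI, List.take_succ_cons, ho]

-- reading the prefix array at a non-negative pc
theorem read_pc (instr : String) (hinstr : instr ≠ "") (lines : List String) (pc : Nat)
    (hpc : pc < (opsOf lines).length) :
    PySem.List.pyGetD (compute_prefix instr lines) (pc : Int) 0 =
      cntI instr ((opsOf lines).take (pc + 1)) := by
  rw [compute_prefix_eq instr hinstr, PySem.List.pyGetD_natCast,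
    List.getD_eq_getElem?_getD,
    List.getElem?_append_left (by rw [length_prefAux]; exact hpc),
    prefAux_get instr _ 0 pc hpc]
  simp

-- reading the prefix array at labels[target] - 1 for 0 ≤ v ≤ #ops
theorem read_label (instr : String) (hinstr : instr ≠ "") (lines : List String) (v : Int)
    (h0 : 0 ≤ v) (hN : v ≤ ((opsOf lines).length : Int)) :
    PySem.List.pyGetD (compute_prefix instr lines) (v - 1) 0 =
      cntI instr ((opsOf lines).take v.toNat) := by
  have hle := opsOf_length_le lines
  rw [compute_prefix_eq instr hinstr]
  rcases eq_or_lt_of_le h0 with h0' | h0'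
  · have hv1 : v - 1 = -1 := by omega
    have hK : lines.length + 1 - (opsOf lines).length =
        (lines.length - (opsOf lines).length) + 1 := by omega
    rw [hv1, hK, List.replicate_succ', ← List.append_assoc,
      PySem.List.pyGetD_neg_one_append_singleton]
    have : v.toNat = 0 := by omega
    simp [this, cntI]
  · have hk : v - 1 = ((v.toNat - 1 : Nat) : Int) := by omega
    rw [hk, PySem.List.pyGetD_natCast, List.getD_eq_getElem?_getD,
      List.getElem?_append_left (by rw [length_prefAux]; omega),
      prefAux_get instr _ 0 (v.toNat - 1) (by omega)]
    have : v.toNat - 1 + 1 = v.toNat := by omega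
    simp [this]

theorem sum_weights (l : List String) :
    (l.map extra_weight).sum = 2 * cntI "JMP" l + 2 * cntI "BRR" l + cntI "SRA" l := by
  induction l with
  | nil => simp [cntI]
  | cons o t ih =>
    simp only [List.map_cons, List.sum_cons, ih, cntI, List.countP_cons]
    by_cases h1 : o = "JMP"
    · simp [extra_weight, h1]; ring
    · by_cases h2 : o = "BRR"
      · simp [extra_weight, h2]; ring
      · by_cases h3 : o = "SRA"
        · simp [extra_weight, h3]; ring
        · simp [extra_weight, h1, h2, h3]

theorem sum_take_sub (f : String → Int) (ops : List String) (a b : Nat) (hab : a ≤ b) :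
    (((ops.drop a).take (b - a)).map f).sum =
      ((ops.take b).map f).sum - ((ops.take a).map f).sum := by
  have hsplit : ops.take b = ops.take a ++ (ops.drop a).take (b - a) := by
    rw [← List.take_add]; congr 1; omega
  rw [hsplit, List.map_append, List.sum_append]; ring

theorem off_eq (lines : List String) (labels : List (String × Int)) (target : String) (pc : Nat)
    (hpc : pc < (opsOf lines).length) (v : Int) (hv : labels.lookup target = some v)
    (h0 : 0 ≤ v) (hN : v ≤ ((opsOf lines).length : Int)) :
    cal_approx_offset (pc : Int) target labels (compute_prefix "JMP" lines)
        (compute_prefix "BRR" lines) (compute_prefix "SRA" lines) =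
      approx_offset labels (opsOf lines) (pc : Int) target := by
  have hJ1 := read_pc "JMP" (by decide) lines pc hpc
  have hB1 := read_pc "BRR" (by decide) lines pc hpc
  have hS1 := read_pc "SRA" (by decide) lines pc hpc
  have hJ2 := read_label "JMP" (by decide) lines v h0 hN
  have hB2 := read_label "BRR" (by decide) lines v h0 hN
  have hS2 := read_label "SRA" (by decide) lines v h0 hN
  simp only [cal_approx_offset, approx_offset, hv, Option.getD_some, hJ1, hB1, hS1, hJ2, hB2, hS2]
  by_cases hgt : v > (pc : Int)
  · rw [if_pos hgt]
    have ha : (0:Int) ≤ (pc : Int) + 1 := by omega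
    rw [PySem.List.slice_toNat _ ha h0]
    have h1 : ((pc : Int) + 1).toNat = pc + 1 := by omega
    rw [h1, sum_take_sub extra_weight _ (pc + 1) v.toNat (by omega),
      sum_weights, sum_weights]
    ring
  · rw [if_neg hgt]
    have hb : (0:Int) ≤ (pc : Int) + 1 := by omega
    rw [PySem.List.slice_toNat _ h0 hb]
    have h1 : ((pc : Int) + 1).toNat = pc + 1 := by omega
    rw [h1, sum_take_sub extra_weight _ v.toNat (pc + 1) (by omega),
      sum_weights, sum_weights]
    ring

theorem labelOKb_spec {labels : List (String × Int)} {N : Nat} {t : String}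
    (h : labelOKb labels N t = true) :
    ∃ v, labels.lookup t = some v ∧ 0 ≤ v ∧ v ≤ (N : Int) := by
  unfold labelOKb at h
  cases hlk : labels.lookup t with
  | none => rw [hlk] at h; simp at h
  | some v => rw [hlk] at h; simp only [decide_eq_true_eq] at h; exact ⟨v, rfl, h⟩

set_option maxHeartbeats 2000000 in
theorem main_go (lines : List String) (labels : List (String × Int)) :
    ∀ (rest : List String) (pc : Nat) (acc : List String),
      pc + (opsOf rest).length = (opsOf lines).length →
      (∀ l ∈ rest, LinePreB labels (pvNoncount lines) l = true) →
      expand_go labels (compute_prefix "JMP" lines) (compute_prefix "BRR" lines)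
          (compute_prefix "SRA" lines) rest (pc : Int) acc =
        acc ++ expand_alt_go labels (opsOf lines) rest (pc : Int) := by
  intro rest
  induction rest with
  | nil => intro pc acc _ _; simp [expand_go, expand_alt_go]
  | cons raw t ih =>
    intro pc acc hlen hpre
    have hr := hpre raw (List.mem_cons_self)
    have hpt : ∀ l ∈ t, LinePreB labels (pvNoncount lines) l = true :=
      fun l hl => hpre l (List.mem_cons_of_mem _ hl)
    simp only [opsOf] at hlen
    simp only [expand_go, expand_alt_go]
    cases hl : PySem.Str.endswith (PySem.Str.strip raw) ":"
    · -- a non-label line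
      rw [hl] at hlen
      simp only [Bool.false_eq_true, if_false, List.length_cons] at hlen ⊢
      have hpc : pc < (opsOf lines).length := by omega
      have hlen' : (pc + 1) + (opsOf t).length = (opsOf lines).length := by omega
      have hcast : (pc : Int) + 1 = ((pc + 1 : Nat) : Int) := by push_cast; ring
      simp only [LinePreB] at hr
      rw [hl] at hr
      simp only [Bool.false_eq_true, if_false, Bool.and_eq_true] at hr
      simp only [rewrite_line]
      set parts := PySem.Str.split₀ (PySem.Str.strip raw) with hparts
      set op := PySem.Str.upper (parts.headD "") with hop
      have hN := opsOf_length lines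
      by_cases hsra : op = "SRA"
      · rw [if_pos (Or.inl hsra)] at hr
        have hok := hr.2
        rw [Bool.and_eq_true] at hok
        obtain ⟨v, hv, h0, hvN⟩ := labelOKb_spec hok.2
        rw [← hN] at hvN
        have hoff := off_eq lines labels (parts.getD 1 "") pc hpc v hv h0 hvN
        rw [if_pos hsra, if_pos hsra, hoff]
        split_ifs <;>
          (rw [hcast, ih (pc + 1) _ hlen' hpt]; simp [List.append_assoc])
      · by_cases hjmp : op = "JMP"
        · rw [if_pos (Or.inr hjmp)] at hr
          have hok := hr.2
          rw [Bool.and_eq_true] at hok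
          obtain ⟨v, hv, h0, hvN⟩ := labelOKb_spec hok.2
          rw [← hN] at hvN
          have hoff := off_eq lines labels (parts.getD 1 "") pc hpc v hv h0 hvN
          rw [if_neg hsra, if_neg hsra, if_pos hjmp, if_pos hjmp, hoff]
          split_ifs <;>
            (rw [hcast, ih (pc + 1) _ hlen' hpt]; simp [List.append_assoc])
        · rw [if_neg (not_or.mpr ⟨hsra, hjmp⟩)] at hr
          by_cases hbrr : op = "BRR" ∧ (labels.lookup (parts.getD 2 "")).isSome = true
          · rw [if_pos hbrr.1] at hr
            have hok : labelOKb labels (pvNoncount lines) (parts.getD 2 "") = true := by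
              have h2' := hr.2
              rw [Bool.and_eq_true] at h2'
              have h2 := h2'.2
              rw [Bool.or_eq_true] at h2
              rcases h2 with h3 | h3
              · rw [hbrr.2] at h3; simp at h3
              · exact h3
            obtain ⟨v, hv, h0, hvN⟩ := labelOKb_spec hok
            rw [← hN] at hvN
            have hoff := off_eq lines labels (parts.getD 2 "") pc hpc v hv h0 hvN
            rw [if_neg hsra, if_neg hsra, if_neg hjmp, if_neg hjmp,
              if_pos hbrr, if_pos hbrr, hoff]
            split_ifs <;>
              (rw [hcast, ih (pc + 1) _ hlen' hpt]; simp [List.append_assoc])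
          · rw [if_neg hsra, if_neg hsra, if_neg hjmp, if_neg hjmp,
              if_neg hbrr, if_neg hbrr]
            rw [hcast, ih (pc + 1) _ hlen' hpt]
            simp [List.append_assoc]
    · -- a label line: both sides pass it through
      rw [hl] at hlen
      simp only [reduceIte] at hlen ⊢
      rw [ih pc (acc ++ [PySem.Str.strip raw]) hlen hpt]
      simp [List.append_assoc]

-- ===== VERDICT (by name: the statement is the Claim_ definition above) =====
theorem expand_label_macros_spec : Claim_equal_expand_label_macros := by
  intro lines labels _hdom hpre
  unfold Spec_expand_label_macros expand_label_macros expand_label_macros_alt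
  have h := main_go lines labels lines 0 [] (by simp)
    (by intro l hl; exact List.all_eq_true.mp hpre l hl)
  simpa using h
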